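-- pv_equiv track=rewrite | github.com/Rishikauppalapati/mysecond-genAI-project | phase3/embeddings/vector_store.py | is_personal_info_request
-- ===== SOURCE A (Python) =====
-- def is_personal_info_request(query: str) -> bool:
--     """Detect if user is asking for personal information (out of scope)"""
--     personal_keywords = [
--         'my account', 'my investment', 'my portfolio', 'my details',
--         'personal information', 'my name', 'my email', 'my phone',
--         'my address', 'my pan', 'my kyc', 'login', 'password',
--         'account balance', 'my holdings', 'my units', 'my returns'
--     ]
--
--     query_lower = query.lower()
--     return any(keyword in query_lower for keyword in personal_keywords)
-- ===== SOURCE B (Python) =====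
-- def _insert(t, k):
--     """Insert nonempty string k into ternary-search-tree t."""
--     if t is None:
--         if len(k) == 1:
--             return (k[0], True, None, None, None)
--         return (k[0], False, None, _insert(None, k[1:]), None)
--     c, stop, lo, eq, hi = t
--     if k[0] < c:
--         return (c, stop, _insert(lo, k), eq, hi)
--     if c < k[0]:
--         return (c, stop, lo, eq, _insert(hi, k))
--     if len(k) == 1:
--         return (c, True, lo, eq, hi)
--     return (c, stop, lo, _insert(eq, k[1:]), hi)
--
--
-- def _match(t, s):
--     """True iff some string stored in t is a prefix of s."""
--     if t is None or not s:
--         return False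
--     c, stop, lo, eq, hi = t
--     x = s[0]
--     if x < c:
--         return _match(lo, s)
--     if c < x:
--         return _match(hi, s)
--     return stop or _match(eq, s[1:])
--
--
-- def is_personal_info_request(query: str) -> bool:
--     """Detect if user is asking for personal information (out of scope)"""
--     personal_keywords = [
--         'my account', 'my investment', 'my portfolio', 'my details',
--         'personal information', 'my name', 'my email', 'my phone',
--         'my address', 'my pan', 'my kyc', 'login', 'password',
--         'account balance', 'my holdings', 'my units', 'my returns'
--     ]
--     root = None
--     for k in personal_keywords:
--         root = _insert(root, k)
--     q = query.lower()
--     for i in range(len(q)):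
--         if _match(root, q[i:]):
--             return True
--     return False
-- ===== Notes on version B (the rewrite author's own statement) =====
-- stated objective: alternative
-- what changed: B builds a ternary search tree of the keywords once and then makes a single left-to-right scan of the lowered query, walking the tree at each start position, instead of A's 17 independent full substring searches.
import Mathlib
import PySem

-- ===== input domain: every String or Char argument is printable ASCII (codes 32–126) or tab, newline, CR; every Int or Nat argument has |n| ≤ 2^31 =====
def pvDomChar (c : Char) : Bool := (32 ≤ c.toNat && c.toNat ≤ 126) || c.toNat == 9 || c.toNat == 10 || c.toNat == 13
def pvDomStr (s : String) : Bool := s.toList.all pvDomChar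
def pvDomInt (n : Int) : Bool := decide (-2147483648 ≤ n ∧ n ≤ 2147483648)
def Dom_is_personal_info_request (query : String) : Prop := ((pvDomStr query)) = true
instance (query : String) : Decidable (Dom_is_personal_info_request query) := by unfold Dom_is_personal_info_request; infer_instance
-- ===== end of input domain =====

-- B builds a ternary search tree of the keywords once and scans the lowered query once,
-- walking the tree at each start position, instead of A's 17 independent substring searches
-- (objective: alternative algorithm, same measured cost).


-- ===== PORT A =====
def pvKeywordsA : List String := [
  "my account", "my investment", "my portfolio", "my details",
  "personal information", "my name", "my email", "my phone",
  "my address", "my pan", "my kyc", "login", "password",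
  "account balance", "my holdings", "my units", "my returns"]

def is_personal_info_request (query : String) : Bool :=
  let query_lower := PySem.Str.lower query
  pvKeywordsA.any (fun keyword => PySem.Str.isIn keyword query_lower)

-- ===== PORT B =====
-- ternary search tree: node char, terminal flag, lower / equal / higher children
inductive PvTrie where
  | nil
  | node (c : Char) (stop : Bool) (lo eq hi : PvTrie)
deriving DecidableEq, Repr

-- _insert in Source B (never called with k = []; that catch-all returns t unchanged)
def pvInsert : PvTrie → List Char → PvTrie
  | t, [] => t
  | .nil, c :: rest =>
      match rest with
      | [] => .node c true .nil .nil .nil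
      | r :: rs => .node c false .nil (pvInsert .nil (r :: rs)) .nil
  | .node d stop lo eq hi, c :: rest =>
      if c < d then .node d stop (pvInsert lo (c :: rest)) eq hi
      else if d < c then .node d stop lo eq (pvInsert hi (c :: rest))
      else match rest with
        | [] => .node d true lo eq hi
        | r :: rs => .node d stop lo (pvInsert eq (r :: rs)) hi
termination_by t k => (sizeOf t, k.length)
decreasing_by all_goals simp_wf; omega

-- _match in Source B: does some stored string prefix s?
def pvMatch : PvTrie → List Char → Bool
  | .nil, _ => false
  | .node _ _ _ _ _, [] => false
  | .node c stop lo eq hi, x :: xs =>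
      if x < c then pvMatch lo (x :: xs)
      else if c < x then pvMatch hi (x :: xs)
      else stop || pvMatch eq xs

-- the 'for i in range(len(q))' loop of Source B, as recursion over the suffixes q[i:]
def pvScan (t : PvTrie) : List Char → Bool
  | [] => false
  | x :: xs => pvMatch t (x :: xs) || pvScan t xs

def pvKeywordsB : List String := [
  "my account", "my investment", "my portfolio", "my details",
  "personal information", "my name", "my email", "my phone",
  "my address", "my pan", "my kyc", "login", "password",
  "account balance", "my holdings", "my units", "my returns"]

def is_personal_info_request_alt (query : String) : Bool :=
  let root := pvKeywordsB.foldl (fun t k => pvInsert t k.toList) PvTrie.nil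
  pvScan root (PySem.Str.lower query).toList

-- ===== PRECONDITION & SPEC =====
def Spec_is_personal_info_request (query : String) (out : Bool) : Prop := out = is_personal_info_request_alt query
instance (query : String) (out : Bool) : Decidable (Spec_is_personal_info_request query out) := by unfold Spec_is_personal_info_request; infer_instance

-- ===== CLAIM (what is proved, stated in full; the proofs are below) =====
def Claim_equal_is_personal_info_request : Prop := ∀ (query : String), Dom_is_personal_info_request query → Spec_is_personal_info_request query (is_personal_info_request query)

-- ===== LEMMAS AND PROOFS =====

theorem pvMatch_nil_arg (t : PvTrie) : pvMatch t [] = false := by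
  cases t <;> simp [pvMatch]

theorem pvInsert_node (d : Char) (stop : Bool) (lo eq hi : PvTrie) (c : Char) (rest : List Char) :
    pvInsert (.node d stop lo eq hi) (c :: rest) =
      if c < d then .node d stop (pvInsert lo (c :: rest)) eq hi
      else if d < c then .node d stop lo eq (pvInsert hi (c :: rest))
      else match rest with
        | [] => .node d true lo eq hi
        | r :: rs => .node d stop lo (pvInsert eq (r :: rs)) hi := by
  cases rest <;> simp only [pvInsert]

theorem pvMatch_nil_trie (s : List Char) : pvMatch PvTrie.nil s = false := by
  cases s <;> simp [pvMatch]

-- inserting a nonempty k adds exactly the prefix-matches of k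
theorem pvMatch_insert (k : List Char) (hk : k ≠ []) (t : PvTrie) (s : List Char) :
    pvMatch (pvInsert t k) s = (pvMatch t s || decide (k <+: s)) := by
  induction k generalizing t s with
  | nil => exact absurd rfl hk
  | cons c rest ih =>
    induction t generalizing s with
    | nil =>
      cases rest with
      | nil =>
        cases s with
        | nil => simp [pvInsert, pvMatch]
        | cons x xs =>
          rcases lt_trichotomy x c with h | h | h
          · simp [pvInsert, pvMatch, h, List.cons_prefix_cons, h.ne']
          · subst h
            simp [pvInsert, pvMatch, List.cons_prefix_cons]
          · simp [pvInsert, pvMatch, h, not_lt_of_gt h, List.cons_prefix_cons, h.ne]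
      | cons r rs =>
        cases s with
        | nil => simp [pvInsert, pvMatch]
        | cons x xs =>
          rcases lt_trichotomy x c with h | h | h
          · simp [pvInsert, pvMatch, h, List.cons_prefix_cons, h.ne']
          · subst h
            simp [pvInsert, pvMatch, List.cons_prefix_cons,
              ih (by simp)]
          · simp [pvInsert, pvMatch, h, not_lt_of_gt h, List.cons_prefix_cons, h.ne]
    | node d stop lo eq hi lo_ih eq_ih hi_ih =>
      rcases lt_trichotomy c d with hcd | hcd | hcd
      · -- c < d : insertion goes into lo
        cases s with
        | nil => simp [pvInsert_node, pvMatch, hcd, pvMatch_nil_arg]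
        | cons x xs =>
          rcases lt_trichotomy x d with h | h | h
          · simp [pvInsert_node, pvMatch, hcd, h, lo_ih]
          · subst h
            simp [pvInsert_node, pvMatch, hcd, List.cons_prefix_cons, hcd.ne,
              Bool.or_comm, Bool.or_left_comm]
          · simp [pvInsert_node, pvMatch, hcd, h, not_lt_of_gt h, List.cons_prefix_cons,
              (lt_trans hcd h).ne]
      · -- c = d : same node
        subst hcd
        cases rest with
        | nil =>
          cases s with
          | nil => simp [pvInsert_node, pvMatch, pvMatch_nil_arg]
          | cons x xs =>
            rcases lt_trichotomy x c with h | h | h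
            · simp [pvInsert_node, pvMatch, h, List.cons_prefix_cons, h.ne']
            · subst h
              simp [pvInsert_node, pvMatch, List.cons_prefix_cons]
            · simp [pvInsert_node, pvMatch, h, not_lt_of_gt h, List.cons_prefix_cons,
                h.ne]
        | cons r rs =>
          cases s with
          | nil => simp [pvInsert_node, pvMatch, pvMatch_nil_arg]
          | cons x xs =>
            rcases lt_trichotomy x c with h | h | h
            · simp [pvInsert_node, pvMatch, h, List.cons_prefix_cons, h.ne']
            · subst h
              simp [pvInsert_node, pvMatch, List.cons_prefix_cons, ih (by simp),
                Bool.or_assoc]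
            · simp [pvInsert_node, pvMatch, h, not_lt_of_gt h, List.cons_prefix_cons,
                h.ne]
      · -- d < c : insertion goes into hi
        cases s with
        | nil => simp [pvInsert_node, pvMatch, hcd, not_lt_of_gt hcd, pvMatch_nil_arg]
        | cons x xs =>
          rcases lt_trichotomy x d with h | h | h
          · simp [pvInsert_node, pvMatch, hcd, not_lt_of_gt hcd, h, List.cons_prefix_cons,
              (lt_trans h hcd).ne']
          · subst h
            simp [pvInsert_node, pvMatch, hcd, not_lt_of_gt hcd, List.cons_prefix_cons,
              hcd.ne']
          · simp [pvInsert_node, pvMatch, hcd, not_lt_of_gt hcd, h, not_lt_of_gt h, hi_ih,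
              Bool.or_comm]

theorem pvMatch_foldl (ks : List String) (h : ∀ k ∈ ks, k.toList ≠ []) (t : PvTrie) (s : List Char) :
    pvMatch (ks.foldl (fun t k => pvInsert t k.toList) t) s
      = (pvMatch t s || ks.any (fun k => decide (k.toList <+: s))) := by
  induction ks generalizing t with
  | nil => simp
  | cons k ks ih =>
    simp only [List.foldl_cons, List.any_cons]
    rw [ih (fun a ha => h a (by simp [ha])), pvMatch_insert k.toList (h k (by simp)) t s,
      Bool.or_assoc]

theorem pvScan_eq_exists (t : PvTrie) (s : List Char) :
    pvScan t s = true ↔ ∃ j, pvMatch t (s.drop j) = true := by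
  induction s with
  | nil =>
    simp [pvScan, pvMatch_nil_arg]
  | cons x xs ih =>
    simp only [pvScan, Bool.or_eq_true, ih]
    constructor
    · rintro (h | ⟨j, hj⟩)
      · exact ⟨0, h⟩
      · exact ⟨j + 1, hj⟩
    · rintro ⟨j, hj⟩
      cases j with
      | zero => exact Or.inl hj
      | succ j => exact Or.inr ⟨j, hj⟩

theorem pv_keywords_nonempty : ∀ k ∈ pvKeywordsB, k.toList ≠ [] := by decide

theorem pv_keywords_eq : pvKeywordsA = pvKeywordsB := rfl

-- ===== VERDICT (by name: the statement is the Claim_ definition above) =====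
theorem is_personal_info_request_spec : Claim_equal_is_personal_info_request := by
  intro query _
  unfold Spec_is_personal_info_request
  simp only [is_personal_info_request, is_personal_info_request_alt, pv_keywords_eq]
  rw [Bool.eq_iff_iff, pvScan_eq_exists]
  simp only [List.any_eq_true, PySem.Str.isIn_eq, PySem.Str.toList_lower,
    ← PySem.Chars.exists_prefix_drop_iff_isIn]
  constructor
  · rintro ⟨k, hk, j, hj⟩
    refine ⟨j, ?_⟩
    rw [pvMatch_foldl pvKeywordsB pv_keywords_nonempty]
    simp only [pvMatch_nil_trie, Bool.false_or, List.any_eq_true]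
    exact ⟨k, hk, by simpa using hj⟩
  · rintro ⟨j, hj⟩
    rw [pvMatch_foldl pvKeywordsB pv_keywords_nonempty] at hj
    simp only [pvMatch_nil_trie, Bool.false_or, List.any_eq_true] at hj
    obtain ⟨k, hk, hp⟩ := hj
    exact ⟨k, hk, j, by simpa using hp⟩
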